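-- pv_equiv track=rewrite | github.com/marekk13/biedronka | biedronka.py | assign_to_months
-- ===== SOURCE A (Python) =====
-- def assign_to_months(data: list[tuple[str, list[list[str, str]]]]) -> dict[
--         str, list[tuple[str, list[list[str, str]]]]]:
--     dates_d = {}
--     for doc in data:
--         month_year = doc[0].split(' ')[0].split('.', 1)[1]
--         shoppings_in_month = dates_d.setdefault(month_year, [])
--         shoppings_in_month.append(doc)
--     return dates_d
-- ===== SOURCE B (Python) =====
-- def assign_to_months(data):
--     def key(doc):
--         return doc[0].split(' ')[0].split('.', 1)[1]
--     months = dict.fromkeys(key(doc) for doc in data)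
--     return {m: [doc for doc in data if key(doc) == m] for m in months}
-- ===== Notes on version B (the rewrite author's own statement) =====
-- stated objective: alternative
-- what changed: Replaces the single-pass setdefault-accumulation into a mutable dict by a two-phase group-by: collect the distinct month keys in first-appearance order with dict.fromkeys, then build each group by filtering the data per key.
import Mathlib
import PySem

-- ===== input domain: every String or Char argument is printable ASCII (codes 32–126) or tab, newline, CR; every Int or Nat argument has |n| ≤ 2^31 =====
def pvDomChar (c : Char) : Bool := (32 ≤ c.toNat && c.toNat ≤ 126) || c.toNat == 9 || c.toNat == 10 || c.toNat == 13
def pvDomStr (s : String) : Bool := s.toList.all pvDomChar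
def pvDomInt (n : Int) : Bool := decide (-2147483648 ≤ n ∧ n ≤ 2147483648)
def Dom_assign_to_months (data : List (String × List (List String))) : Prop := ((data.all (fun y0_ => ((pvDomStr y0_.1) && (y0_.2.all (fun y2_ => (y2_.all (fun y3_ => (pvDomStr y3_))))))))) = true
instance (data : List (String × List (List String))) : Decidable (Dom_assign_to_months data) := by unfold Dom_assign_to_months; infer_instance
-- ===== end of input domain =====

-- B groups by a two-phase pass (distinct keys in first-appearance order, then one filter per key)
-- instead of A's one-pass setdefault accumulation; objective: alternative (same results, not faster).

-- shared key extraction: doc[0].split(' ')[0].split('.', 1)[1]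
-- (the .getD defaults are reached only where Python raises IndexError — those inputs are outside Pre_)
def monthKey (s : String) : String :=
  (PySem.List.pyGet?
    ((PySem.Str.splitMax? ((PySem.List.pyGet? ((PySem.Str.split? s " ").getD []) 0).getD "") "." 1).getD [])
    1).getD ""

-- ===== PORT A =====
def assign_to_months (data : List (String × List (List String))) : List (String × List (String × List (List String))) :=
  (data.foldl
    (fun (d : PySem.Dict String (List (String × List (List String)))) doc =>
      d.modify (monthKey doc.1) [] (fun l => l ++ [doc]))
    PySem.Dict.empty).items

-- ===== PORT B =====
def assign_to_months_alt (data : List (String × List (List String))) : List (String × List (String × List (List String))) :=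
  (PySem.List.dedup (data.map (fun doc => monthKey doc.1))).map
    (fun m => (m, data.filter (fun doc => monthKey doc.1 == m)))

-- ===== PRECONDITION & SPEC =====
-- Pre_ excludes inputs where some document's first space-token contains no '.', on which Python A raises IndexError.
def Pre_assign_to_months (data : List (String × List (List String))) : Prop :=
  (data.all (fun doc =>
    PySem.Str.isIn "." ((PySem.List.pyGet? ((PySem.Str.split? doc.1 " ").getD []) 0).getD ""))) = true
instance (data : List (String × List (List String))) : Decidable (Pre_assign_to_months data) := by unfold Pre_assign_to_months; infer_instance
def pvWitness_assign_to_months : (List (String × List (List String))) :=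
  [("01.2024 x", [["a", "1"]]), ("02.2024 y", []), ("01.2024 z", [["b", "2"]])]

def Spec_assign_to_months (data : List (String × List (List String))) (out : List (String × List (String × List (List String)))) : Prop := out = assign_to_months_alt data
instance (data : List (String × List (List String))) (out : List (String × List (String × List (List String)))) : Decidable (Spec_assign_to_months data out) := by unfold Spec_assign_to_months; infer_instance

-- ===== CLAIM (what is proved, stated in full; the proofs are below) =====
def Claim_equal_assign_to_months : Prop := ∀ (data : List (String × List (List String))), Dom_assign_to_months data → Pre_assign_to_months data → Spec_assign_to_months data (assign_to_months data)

-- ===== LEMMAS AND PROOFS =====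

theorem assign_to_months_eq (data : List (String × List (List String))) :
    assign_to_months data = assign_to_months_alt data := by
  unfold assign_to_months assign_to_months_alt
  have hnd : (data.foldl
      (fun (d : PySem.Dict String (List (String × List (List String)))) doc =>
        d.modify (monthKey doc.1) [] (fun l => l ++ [doc]))
      PySem.Dict.empty).keys.Nodup :=
    PySem.Dict.nodup_keys_foldl_modify_key data (fun doc => monthKey doc.1) []
      (fun _ doc l => l ++ [doc]) PySem.Dict.empty (by simp)
  rw [PySem.Dict.items_eq_map_keys _ hnd []]
  have hkeys : (data.foldl
      (fun (d : PySem.Dict String (List (String × List (List String)))) doc =>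
        d.modify (monthKey doc.1) [] (fun l => l ++ [doc]))
      PySem.Dict.empty).keys = PySem.List.dedup (data.map (fun doc => monthKey doc.1)) := by
    have h := PySem.Dict.keys_foldl_modify_key data (fun doc => monthKey doc.1) []
      (fun _ doc l => l ++ [doc]) PySem.Dict.empty
    simpa [PySem.List.dedup_eq_ofList, PySem.Set.update, PySem.Set.ofList] using h
  rw [hkeys]
  refine List.map_congr_left ?_
  intro k hk
  congr 1
  have h := PySem.Dict.getD_foldl_modify_append
    (data.map (fun x => (monthKey x.1, x))) PySem.Dict.empty k
  rw [List.foldl_map] at h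
  simpa [List.filter_map, Function.comp_def, List.map_id, List.map_id'] using h

-- ===== VERDICT (by name: the statement is the Claim_ definition above) =====
theorem assign_to_months_spec : Claim_equal_assign_to_months := by
  intro data _ _
  unfold Spec_assign_to_months
  exact assign_to_months_eq data
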